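-- pv_equiv track=rewrite | github.com/Duy-Thong/I_learn_python | PY01039.py | check
-- ===== SOURCE A (Python) =====
-- def check(s):
--     cnt = 0
--     a=[]
--     for i in s:
--         if i not in a:
--             cnt+=1
--             a.append(i)
--         if cnt>2:
--             return False
--     for i in range(0, len(s)-2):
--         if s[i]!=s[i+2]:
--             return False
--     return True
-- ===== SOURCE B (Python) =====
-- def check(s):
--     return all(s[i] == s[i + 2] for i in range(len(s) - 2))
-- ===== Notes on version B (the rewrite author's own statement) =====
-- stated objective: simpler
-- what changed: B drops A's distinct-character counting pass entirely and returns the single alternating-pattern scan all(s[i]==s[i+2]), since that condition already forces at most 2 distinct characters.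
import Mathlib
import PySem

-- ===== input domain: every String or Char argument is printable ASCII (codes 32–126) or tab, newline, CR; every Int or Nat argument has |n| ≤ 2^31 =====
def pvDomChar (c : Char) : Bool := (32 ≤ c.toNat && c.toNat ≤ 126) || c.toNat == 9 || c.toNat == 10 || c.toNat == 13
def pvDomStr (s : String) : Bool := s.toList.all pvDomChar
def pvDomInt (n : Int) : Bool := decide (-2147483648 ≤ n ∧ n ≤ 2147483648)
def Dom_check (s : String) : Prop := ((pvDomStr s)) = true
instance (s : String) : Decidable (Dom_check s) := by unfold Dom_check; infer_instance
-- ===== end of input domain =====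

-- B drops A's distinct-character counting pass and keeps only the alternating scan
-- all(s[i]==s[i+2]), which already forces at most two distinct characters (simpler).

-- ===== PORT A =====
-- first loop of A: counts distinct chars seen so far in list `a`, bails out when cnt > 2
def checkLoop1 : List Char → Int → List Char → Bool
  | [], _, _ => true
  | i :: rest, cnt, a =>
    let p := if !(a.contains i) then (cnt + 1, a ++ [i]) else (cnt, a)
    if p.1 > 2 then false else checkLoop1 rest p.1 p.2

-- second loop of A: for i in range(0, len(s)-2): if s[i] != s[i+2]: return False
def checkLoop2 (l : List Char) : List Int → Bool
  | [] => true
  | i :: rest =>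
    if PySem.List.pyGet? l i != PySem.List.pyGet? l (i + 2) then false
    else checkLoop2 l rest

def check (s : String) : Bool :=
  let l := s.toList
  if checkLoop1 l 0 [] then
    checkLoop2 l (PySem.List.pyRange 0 ((l.length : Int) - 2) 1)
  else false

-- ===== PORT B =====
def check_alt (s : String) : Bool :=
  let l := s.toList
  (PySem.List.pyRange 0 ((l.length : Int) - 2) 1).all
    (fun i => PySem.List.pyGet? l i == PySem.List.pyGet? l (i + 2))

-- ===== PRECONDITION & SPEC =====
def Spec_check (s : String) (out : Bool) : Prop := out = check_alt s
instance (s : String) (out : Bool) : Decidable (Spec_check s out) := by unfold Spec_check; infer_instance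

-- ===== CLAIM (what is proved, stated in full; the proofs are below) =====
def Claim_equal_check : Prop := ∀ (s : String), Dom_check s → Spec_check s (check s)

-- ===== LEMMAS AND PROOFS =====

-- A's second loop is exactly B's `all` over the same index list.
theorem checkLoop2_eq_all (l : List Char) (r : List Int) :
    checkLoop2 l r = r.all (fun i => PySem.List.pyGet? l i == PySem.List.pyGet? l (i + 2)) := by
  induction r with
  | nil => rfl
  | cons i rest ih =>
    simp only [checkLoop2, List.all_cons, bne]
    by_cases h : (PySem.List.pyGet? l i == PySem.List.pyGet? l (i + 2)) = true
    · simp [h, ih]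
    · simp only [Bool.not_eq_true] at h
      simp [h]

-- If B's scan succeeds, consecutive-step-2 entries of the list agree.
theorem alt_step (l : List Char) (d : Char)
    (h : (PySem.List.pyRange 0 ((l.length : Int) - 2) 1).all
      (fun i => PySem.List.pyGet? l i == PySem.List.pyGet? l (i + 2)) = true)
    (k : Nat) (hk : k + 2 < l.length) : l.getD k d = l.getD (k + 2) d := by
  rw [List.all_eq_true] at h
  have hmem : (k : Int) ∈ PySem.List.pyRange 0 ((l.length : Int) - 2) 1 := by
    rw [PySem.List.mem_pyRange_one]; omega
  have := h _ hmem
  simp only [beq_iff_eq] at this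
  have h2 : ((k : Int) + 2) = ((k + 2 : Nat) : Int) := by push_cast; ring
  rw [h2, PySem.List.pyGet?_natCast, PySem.List.pyGet?_natCast] at this
  have e1 : l[k]? = some l[k] := List.getElem?_eq_getElem (by omega)
  have e2 : l[k + 2]? = some l[k + 2] := List.getElem?_eq_getElem hk
  rw [e1, e2] at this
  have hv : l[k] = l[k + 2] := Option.some.inj this
  rw [List.getD_eq_getElem l d (by omega : k < l.length),
      List.getD_eq_getElem l d hk, hv]

-- Every entry equals the entry at its parity index.
theorem idx_mod (l : List Char) (d : Char)
    (H : ∀ k : Nat, k + 2 < l.length → l.getD k d = l.getD (k + 2) d) :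
    ∀ k : Nat, k < l.length → l.getD k d = l.getD (k % 2) d := by
  intro k
  induction k using Nat.strong_induction_on with
  | _ k ih =>
    intro hk
    by_cases h2 : k < 2
    · have : k % 2 = k := Nat.mod_eq_of_lt h2
      rw [this]
    · have hk2 : k - 2 + 2 = k := by omega
      have := H (k - 2) (by omega)
      rw [hk2] at this
      rw [← this]
      have := ih (k - 2) (by omega) (by omega)
      rw [this]
      congr 1
      omega

-- Hence every element of l is one of its first two entries.
theorem mem_two_vals (l : List Char) (d : Char)
    (H : ∀ k : Nat, k < l.length → l.getD k d = l.getD (k % 2) d) :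
    ∀ c ∈ l, c = l.getD 0 d ∨ c = l.getD 1 d := by
  intro c hc
  obtain ⟨k, hk, hval⟩ := List.getElem_of_mem hc
  have : l.getD k d = c := by rw [List.getD_eq_getElem l d hk, hval]
  rw [← this, H k hk]
  rcases Nat.mod_two_eq_zero_or_one k with h | h <;> rw [h]
  · left; rfl
  · right; rfl

-- A nodup list over two values has at most two elements.
theorem two_val_len (a : List Char) (c0 c1 : Char) (hnd : a.Nodup)
    (hv : ∀ c ∈ a, c = c0 ∨ c = c1) : a.length ≤ 2 := by
  match a, hnd with
  | [], _ => simp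
  | [_], _ => simp
  | [_, _], _ => simp
  | x :: y :: z :: rest, hnd =>
    exfalso
    have hxy : x ≠ y := by
      intro h; exact (List.nodup_cons.mp hnd).1 (h ▸ List.mem_cons_self ..)
    have hxz : x ≠ z := by
      intro h
      exact (List.nodup_cons.mp hnd).1 (h ▸ List.mem_cons_of_mem _ (List.mem_cons_self ..))
    have hyz : y ≠ z := by
      have := (List.nodup_cons.mp hnd).2
      intro h
      exact (List.nodup_cons.mp this).1 (h ▸ List.mem_cons_self ..)
    have hx := hv x (by simp)
    have hy := hv y (by simp)
    have hz := hv z (by simp)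
    rcases hx with h | h <;> rcases hy with h' | h' <;> rcases hz with h'' | h'' <;>
      first
        | exact hxy (h.trans h'.symm)
        | exact hxz (h.trans h''.symm)
        | exact hyz (h'.trans h''.symm)

-- A's counting loop never bails out when all chars come from a two-value set.
theorem loop1_true (c0 c1 : Char) :
    ∀ (xs : List Char) (cnt : Int) (a : List Char),
      (∀ c ∈ xs, c = c0 ∨ c = c1) → (∀ c ∈ a, c = c0 ∨ c = c1) →
      a.Nodup → cnt = (a.length : Int) → checkLoop1 xs cnt a = true := by
  intro xs
  induction xs with
  | nil => intro _ _ _ _ _ _; rfl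
  | cons i rest ih =>
    intro cnt a hxs ha hnd hcnt
    by_cases hmem : i ∈ a
    · have hle : a.length ≤ 2 := two_val_len a c0 c1 hnd ha
      have : checkLoop1 (i :: rest) cnt a = checkLoop1 rest cnt a := by
        simp [checkLoop1, hmem, show ¬ (2:Int) < cnt by omega]
      rw [this]
      exact ih cnt a (fun c hc => hxs c (List.mem_cons_of_mem _ hc)) ha hnd hcnt
    · have ha' : ∀ c ∈ a ++ [i], c = c0 ∨ c = c1 := by
        intro c hc
        rcases List.mem_append.mp hc with h | h
        · exact ha c h
        · rw [List.mem_singleton.mp h]; exact hxs i (List.mem_cons_self ..)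
      have hnd' : (a ++ [i]).Nodup := by
        simp only [List.nodup_append, List.nodup_singleton, true_and]
        refine ⟨hnd, ?_⟩
        intro x hx y hy
        rw [List.mem_singleton] at hy
        subst hy
        exact fun hxe => hmem (hxe ▸ hx)
      have hle : (a ++ [i]).length ≤ 2 := two_val_len _ c0 c1 hnd' ha'
      simp only [List.length_append, List.length_singleton] at hle
      have : checkLoop1 (i :: rest) cnt a = checkLoop1 rest (cnt + 1) (a ++ [i]) := by
        simp [checkLoop1, hmem, show ¬ (2:Int) < cnt + 1 by omega]
      rw [this]
      exact ih (cnt + 1) (a ++ [i])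
        (fun c hc => hxs c (List.mem_cons_of_mem _ hc)) ha' hnd'
        (by simp [hcnt])

-- If B's scan succeeds, A's first loop returns true.
theorem loop1_of_alt (l : List Char)
    (h : (PySem.List.pyRange 0 ((l.length : Int) - 2) 1).all
      (fun i => PySem.List.pyGet? l i == PySem.List.pyGet? l (i + 2)) = true) :
    checkLoop1 l 0 [] = true := by
  have hstep := alt_step l 'a' h
  have hmod := idx_mod l 'a' hstep
  have hmem := mem_two_vals l 'a' hmod
  exact loop1_true (l.getD 0 'a') (l.getD 1 'a') l 0 [] hmem (by simp) List.nodup_nil rfl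

-- ===== VERDICT (by name: the statement is the Claim_ definition above) =====
theorem check_spec : Claim_equal_check := by
  intro s _
  unfold Spec_check
  simp only [check, check_alt]
  by_cases h1 : checkLoop1 s.toList 0 [] = true
  · rw [if_pos h1, checkLoop2_eq_all]
  · rw [if_neg h1]
    cases hb : (PySem.List.pyRange 0 ((s.toList.length : Int) - 2) 1).all
        (fun i => PySem.List.pyGet? s.toList i == PySem.List.pyGet? s.toList (i + 2)) with
    | false => rfl
    | true => exact absurd (loop1_of_alt s.toList hb) h1
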